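-- pv_equiv track=rewrite | github.com/pypi-data/pypi-mirror-403 | packages/ygg/ygg-0.1.57-py3-none-any.whl/yggdrasil/pyutils/python_env.py | _split_on_tag
-- ===== SOURCE A (Python) =====
-- from typing import Any, Iterable, Iterator, Mapping, MutableMapping, Optional, Union, List, Tuple
--
-- def _split_on_tag(stdout: str, tag: str) -> tuple[list[str], Optional[str]]:
--     """Split stdout into lines before the tag and the tag payload.
--
--     Args:
--         stdout: Captured stdout text.
--         tag: Prefix tag to split on.
--
--     Returns:
--         Tuple of lines before the tag and tag payload.
--     """
--     lines = (stdout or "").splitlines()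
--     before: list[str] = []
--     payload: Optional[str] = None
--     for line in lines:
--         if payload is None and line.startswith(tag):
--             payload = line[len(tag) :]
--             continue
--         if payload is None:
--             before.append(line)
--     return before, payload
-- ===== SOURCE B (Python) =====
-- def _split_on_tag(stdout, tag):
--     lines = (stdout or "").splitlines()
--     idx = next((i for i, line in enumerate(lines) if line.startswith(tag)), None)
--     if idx is None:
--         return lines, None
--     return lines[:idx], lines[idx][len(tag):]
-- ===== Notes on version B (the rewrite author's own statement) =====
-- stated objective: simpler
-- what changed: B locates the first tag line's index with next(enumerate(...)) and returns a list slice plus the payload of that line, instead of A's flag-guarded accumulation loop that keeps iterating after the tag.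
import Mathlib
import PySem

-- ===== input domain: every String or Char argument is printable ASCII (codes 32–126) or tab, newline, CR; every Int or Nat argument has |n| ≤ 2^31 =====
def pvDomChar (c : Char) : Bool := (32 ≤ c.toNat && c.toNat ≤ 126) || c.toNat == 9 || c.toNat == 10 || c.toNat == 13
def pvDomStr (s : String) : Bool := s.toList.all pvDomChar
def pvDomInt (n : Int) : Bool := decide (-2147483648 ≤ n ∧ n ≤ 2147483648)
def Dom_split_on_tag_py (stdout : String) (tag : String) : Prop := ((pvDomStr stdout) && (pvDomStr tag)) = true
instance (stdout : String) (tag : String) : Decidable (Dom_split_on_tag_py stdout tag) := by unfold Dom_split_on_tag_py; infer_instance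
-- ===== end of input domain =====

-- B finds the first tag line by index and slices, instead of A's flag-guarded accumulation loop; return values proved equal on all inputs.
-- ===== PORT A =====
-- one loop step of A's for-loop over the state (before, payload)
def splitTagStepA (tag : String) (s : List String × Option String) (line : String) :
    List String × Option String :=
  if s.2 = none ∧ PySem.Str.startswith line tag then
    (s.1, some (PySem.Str.slice line (some (PySem.Str.len tag)) none))
  else if s.2 = none then (s.1 ++ [line], s.2)
  else s

def split_on_tag_py (stdout : String) (tag : String) : List String × Option String :=
  let lines := PySem.Str.splitlines (if stdout == "" then "" else stdout)
  lines.foldl (splitTagStepA tag) ([], none)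

-- ===== PORT B =====
def split_on_tag_py_alt (stdout : String) (tag : String) : List String × Option String :=
  let lines := PySem.Str.splitlines (if stdout == "" then "" else stdout)
  match lines.findIdx? (fun line => PySem.Str.startswith line tag) with
  | none => (lines, none)
  | some i =>
      (PySem.List.slice lines none (some (i : Int)),
       some (PySem.Str.slice (lines.getD i "") (some (PySem.Str.len tag)) none))

-- ===== PRECONDITION & SPEC =====
def Spec_split_on_tag_py (stdout : String) (tag : String) (out : List String × Option String) : Prop := out = split_on_tag_py_alt stdout tag
instance (stdout : String) (tag : String) (out : List String × Option String) : Decidable (Spec_split_on_tag_py stdout tag out) := by unfold Spec_split_on_tag_py; infer_instance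

-- ===== CLAIM (what is proved, stated in full; the proofs are below) =====
def Claim_equal_split_on_tag_py : Prop := ∀ (stdout : String) (tag : String), Dom_split_on_tag_py stdout tag → Spec_split_on_tag_py stdout tag (split_on_tag_py stdout tag)

-- ===== LEMMAS AND PROOFS =====

-- once payload is set, A's loop never changes the state
lemma foldl_stepA_some (tag : String) (lines : List String) (acc : List String) (x : String) :
    lines.foldl (splitTagStepA tag) (acc, some x) = (acc, some x) := by
  induction lines with
  | nil => rfl
  | cons l ls ih => simp [List.foldl, splitTagStepA, ih]

-- A's loop from a (acc, none) state, characterised by the first tag line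
lemma foldl_stepA_none (tag : String) (lines : List String) (acc : List String) :
    lines.foldl (splitTagStepA tag) (acc, none) =
      match lines.findIdx? (fun line => PySem.Str.startswith line tag) with
      | none => (acc ++ lines, none)
      | some i =>
          (acc ++ lines.take i,
           some (PySem.Str.slice (lines.getD i "") (some (PySem.Str.len tag)) none)) := by
  induction lines generalizing acc with
  | nil => simp
  | cons l ls ih =>
      by_cases h : PySem.Chars.startswith l.toList tag.toList = true
      · simp [List.foldl, splitTagStepA, h, foldl_stepA_some, List.findIdx?_cons]
      · simp only [List.foldl, splitTagStepA, PySem.Str.startswith_eq, h, and_false,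
          Bool.false_eq_true, if_false, if_true, List.findIdx?_cons] at ih ⊢
        rw [ih (acc ++ [l])]
        cases hf : ls.findIdx? (fun line => PySem.Chars.startswith line.toList tag.toList) with
        | none => simp
        | some i => simp [List.getD]

theorem split_on_tag_py_spec : Claim_equal_split_on_tag_py := by
  intro stdout tag _
  unfold Spec_split_on_tag_py split_on_tag_py split_on_tag_py_alt
  rw [foldl_stepA_none]
  cases hf : (PySem.Str.splitlines (if stdout == "" then "" else stdout)).findIdx?
      (fun line => PySem.Str.startswith line tag) with
  | none => simp only [hf]; simp
  | some i => simp only [hf]; rw [PySem.List.slice_to_natCast]; simp
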